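-- pv_equiv track=rewrite | github.com/dishakarnayake/CrackYourPlacement | 42-Day/Chocola-Chocolate.py | min_cost_to_break_chocolate
-- ===== SOURCE A (Python) =====
-- def min_cost_to_break_chocolate(m, n, x_costs, y_costs):
--     x_costs.sort(reverse=True)
--     y_costs.sort(reverse=True)
--
--     total_cost = 0
--     h_segments = 1  # initially we have 1 horizontal segment
--     v_segments = 1  # initially we have 1 vertical segment
--
--     i = 0  # pointer for x_costs
--     j = 0  # pointer for y_costs
--
--     while i < len(x_costs) and j < len(y_costs):
--         if x_costs[i] >= y_costs[j]:
--             total_cost += x_costs[i] * v_segments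
--             h_segments += 1
--             i += 1
--         else:
--             total_cost += y_costs[j] * h_segments
--             v_segments += 1
--             j += 1
--
--     # Add remaining x_costs if any
--     while i < len(x_costs):
--         total_cost += x_costs[i] * v_segments
--         i += 1
--
--     # Add remaining y_costs if any
--     while j < len(y_costs):
--         total_cost += y_costs[j] * h_segments
--         j += 1
--
--     return total_cost
-- ===== SOURCE B (Python) =====
-- def min_cost_to_break_chocolate(m, n, x_costs, y_costs):
--     # in-place sorts kept to preserve A's observable mutation of the arguments
--     x_costs.sort(reverse=True)
--     y_costs.sort(reverse=True)
--     total = 0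
--     for x in x_costs:
--         total += x * (1 + sum(1 for y in y_costs if y > x))
--     for y in y_costs:
--         total += y * (1 + sum(1 for x in x_costs if x >= y))
--     return total
-- ===== Notes on version B (the rewrite author's own statement) =====
-- stated objective: alternative
-- what changed: Replaced the two-pointer merge over the two sorted lists (with its two tail loops and segment counters) by a closed-form counting formula: each cut's multiplier is computed directly as 1 plus the number of opposite-orientation cuts that precede it (y > x, resp. x >= y), summed in two independent passes.
import Mathlib
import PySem

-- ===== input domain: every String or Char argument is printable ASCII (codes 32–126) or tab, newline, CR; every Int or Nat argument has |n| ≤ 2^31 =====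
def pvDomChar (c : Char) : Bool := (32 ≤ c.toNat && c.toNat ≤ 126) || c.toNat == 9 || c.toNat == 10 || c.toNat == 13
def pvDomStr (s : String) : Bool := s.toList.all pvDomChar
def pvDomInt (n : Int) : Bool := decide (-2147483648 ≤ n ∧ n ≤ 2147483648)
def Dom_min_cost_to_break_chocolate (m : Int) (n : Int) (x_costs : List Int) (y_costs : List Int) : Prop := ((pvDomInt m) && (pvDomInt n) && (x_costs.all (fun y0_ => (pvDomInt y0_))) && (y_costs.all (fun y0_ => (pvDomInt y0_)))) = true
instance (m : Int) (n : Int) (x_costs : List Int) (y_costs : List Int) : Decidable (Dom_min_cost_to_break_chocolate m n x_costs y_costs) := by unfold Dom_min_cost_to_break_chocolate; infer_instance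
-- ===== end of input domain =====

-- B replaces A's two-pointer merge and tail loops by direct counting of preceding opposite cuts (alternative decomposition, same return value; both sort the input lists in place).


-- ===== PORT A =====
-- A's while-loops as structural recursion: the two-pointer merge, then the two tail loops as folds.
def pvLoopA (xs ys : List Int) (h v t : Int) : Int :=
  match xs, ys with
  | x :: xs', y :: ys' =>
      if x >= y then pvLoopA xs' (y :: ys') (h + 1) v (t + x * v)
      else pvLoopA (x :: xs') ys' h (v + 1) (t + y * h)
  | xs, [] => xs.foldl (fun t x => t + x * v) t
  | [], ys => ys.foldl (fun t y => t + y * h) t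
termination_by xs.length + ys.length
decreasing_by all_goals simp

def min_cost_to_break_chocolate (m : Int) (n : Int) (x_costs : List Int) (y_costs : List Int) : Int :=
  let xs := PySem.List.sorted x_costs (fun x => x) true
  let ys := PySem.List.sorted y_costs (fun x => x) true
  pvLoopA xs ys 1 1 0

-- ===== PORT B =====
-- B: multiplier of each cut computed directly by counting the opposite cuts made before it.
def min_cost_to_break_chocolate_alt (m : Int) (n : Int) (x_costs : List Int) (y_costs : List Int) : Int :=
  let xs := PySem.List.sorted x_costs (fun x => x) true
  let ys := PySem.List.sorted y_costs (fun x => x) true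
  let tx := xs.foldl (fun t x => t + x * (1 + (ys.countP (fun y => decide (x < y)) : Int))) 0
  ys.foldl (fun t y => t + y * (1 + (xs.countP (fun x => decide (y <= x)) : Int))) tx

-- ===== PRECONDITION & SPEC =====
def Spec_min_cost_to_break_chocolate (m : Int) (n : Int) (x_costs : List Int) (y_costs : List Int) (out : Int) : Prop := out = min_cost_to_break_chocolate_alt m n x_costs y_costs
instance (m : Int) (n : Int) (x_costs : List Int) (y_costs : List Int) (out : Int) : Decidable (Spec_min_cost_to_break_chocolate m n x_costs y_costs out) := by unfold Spec_min_cost_to_break_chocolate; infer_instance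

-- ===== CLAIM (what is proved, stated in full; the proofs are below) =====
def Claim_equal_min_cost_to_break_chocolate : Prop := ∀ (m : Int) (n : Int) (x_costs : List Int) (y_costs : List Int), Dom_min_cost_to_break_chocolate m n x_costs y_costs → Spec_min_cost_to_break_chocolate m n x_costs y_costs (min_cost_to_break_chocolate m n x_costs y_costs)

-- ===== LEMMAS AND PROOFS =====
-- loop invariant: on descending lists, the merge with counters h, v equals the counting sums
lemma pvLoopA_eq (xs ys : List Int) (h v t : Int)
    (hx : xs.Pairwise (fun a b => b <= a)) (hy : ys.Pairwise (fun a b => b <= a)) :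
    pvLoopA xs ys h v t =
      t + (xs.map (fun x => x * (v + (ys.countP (fun y => decide (x < y)) : Int)))).sum
        + (ys.map (fun y => y * (h + (xs.countP (fun x => decide (y <= x)) : Int)))).sum := by
  induction xs, ys, h, v, t using pvLoopA.induct with
  | case1 h v t x xs' y ys' hge ih =>
    rw [pvLoopA, if_pos hge]
    rw [ih (List.Pairwise.of_cons hx) hy]
    have hy0 : (y :: ys').countP (fun y' => decide (x < y')) = 0 := by
      rw [List.countP_eq_zero]
      intro a ha
      simp only [decide_eq_true_eq, not_lt]
      rcases List.mem_cons.mp ha with rfl | ha'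
      · omega
      · have := (List.pairwise_cons.mp hy).1 a ha'; omega
    have hcnt : ∀ y' ∈ y :: ys',
        ((x :: xs').countP (fun x' => decide (y' <= x')) : Int)
          = 1 + (xs'.countP (fun x' => decide (y' <= x')) : Int) := by
      intro y' hy'
      have h1 : y' <= x := by
        rcases List.mem_cons.mp hy' with rfl | hy''
        · omega
        · have := (List.pairwise_cons.mp hy).1 y' hy''; omega
      rw [List.countP_cons_of_pos (by simpa using h1)]
      push_cast; ring
    have hmap : (y :: ys').map (fun y' => y' * ((h + 1) + (xs'.countP (fun x' => decide (y' <= x')) : Int)))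
        = (y :: ys').map (fun y' => y' * (h + ((x :: xs').countP (fun x' => decide (y' <= x')) : Int))) := by
      apply List.map_congr_left
      intro a ha
      rw [hcnt a ha]; ring
    rw [hmap]
    simp only [List.map_cons, List.sum_cons, hy0]
    push_cast; ring
  | case2 h v t x xs' y ys' hge ih =>
    rw [pvLoopA, if_neg hge]
    rw [ih hx (List.Pairwise.of_cons hy)]
    have hx0 : (x :: xs').countP (fun x' => decide (y <= x')) = 0 := by
      rw [List.countP_eq_zero]
      intro a ha
      simp only [decide_eq_true_eq, not_le]
      rcases List.mem_cons.mp ha with rfl | ha'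
      · omega
      · have := (List.pairwise_cons.mp hx).1 a ha'; omega
    have hcnt : ∀ x' ∈ x :: xs',
        ((y :: ys').countP (fun y' => decide (x' < y')) : Int)
          = 1 + (ys'.countP (fun y' => decide (x' < y')) : Int) := by
      intro x' hx'
      have h1 : x' < y := by
        rcases List.mem_cons.mp hx' with rfl | hx''
        · omega
        · have := (List.pairwise_cons.mp hx).1 x' hx''; omega
      rw [List.countP_cons_of_pos (by simpa using h1)]
      push_cast; ring
    have hmap : (x :: xs').map (fun x' => x' * ((v + 1) + (ys'.countP (fun y' => decide (x' < y')) : Int)))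
        = (x :: xs').map (fun x' => x' * (v + ((y :: ys').countP (fun y' => decide (x' < y')) : Int))) := by
      apply List.map_congr_left
      intro a ha
      rw [hcnt a ha]; ring
    rw [hmap]
    simp only [List.map_cons, List.sum_cons, hx0]
    push_cast; ring
  | case3 h v t xs =>
    have he : pvLoopA xs [] h v t = xs.foldl (fun t x => t + x * v) t := by
      cases xs <;> rw [pvLoopA]
    rw [he, PySem.List.foldl_add]
    simp [List.countP_nil]
  | case4 h v t ys hne =>
    have he : pvLoopA [] ys h v t = ys.foldl (fun t y => t + y * h) t := by
      cases ys with
      | nil => exact (hne rfl).elim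
      | cons a l =>
        rw [pvLoopA]
        simp
    rw [he, PySem.List.foldl_add]
    simp [List.countP_nil]

-- ===== VERDICT (by name: the statement is the Claim_ definition above) =====
theorem min_cost_to_break_chocolate_spec : Claim_equal_min_cost_to_break_chocolate := by
  intro m n x_costs y_costs _
  unfold Spec_min_cost_to_break_chocolate min_cost_to_break_chocolate min_cost_to_break_chocolate_alt
  rw [pvLoopA_eq _ _ 1 1 0 (PySem.List.sorted_pairwise_rev x_costs (fun x => x))
        (PySem.List.sorted_pairwise_rev y_costs (fun x => x))]
  rw [PySem.List.foldl_add, PySem.List.foldl_add]
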